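-- pv_equiv track=rewrite | github.com/avantikaaa/wtef-codes | assessment3/jumb.py | pick10
-- ===== SOURCE A (Python) =====
-- def pick10(s: str, n:int) -> str:
--     # YOUR CODE HERE
--     out = ""
--     count = 0
--     l = len(s)
--     for i in range (10):
--         out += s[(n + count)%l]
--         count += i+1
--     return out
-- ===== SOURCE B (Python) =====
-- def pick10(s: str, n: int) -> str:
--     # Replicate s into a flat buffer long enough to cover the whole window,
--     # then read the ten fixed (triangular) positions straight out of it:
--     # one modulo for the start, no loop and no per-character wrap-around.
--     l = len(s)
--     start = n % l  # ZeroDivisionError for s == "" just like A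
--     ext = s * ((start + 45) // l + 1)
--     return (ext[start] + ext[start + 1] + ext[start + 3] + ext[start + 6] +
--             ext[start + 10] + ext[start + 15] + ext[start + 21] + ext[start + 28] +
--             ext[start + 36] + ext[start + 45])
-- ===== Notes on version B (the rewrite author's own statement) =====
-- stated objective: alternative
-- what changed: Replaces A's 10-iteration loop with mutable out/count accumulators by a loop-free construction: one modulo computes the start, the string is replicated into a flat buffer covering the whole window, and the ten characters are read at fixed triangular positions with plain indexing (no per-character modulo).
import Mathlib
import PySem

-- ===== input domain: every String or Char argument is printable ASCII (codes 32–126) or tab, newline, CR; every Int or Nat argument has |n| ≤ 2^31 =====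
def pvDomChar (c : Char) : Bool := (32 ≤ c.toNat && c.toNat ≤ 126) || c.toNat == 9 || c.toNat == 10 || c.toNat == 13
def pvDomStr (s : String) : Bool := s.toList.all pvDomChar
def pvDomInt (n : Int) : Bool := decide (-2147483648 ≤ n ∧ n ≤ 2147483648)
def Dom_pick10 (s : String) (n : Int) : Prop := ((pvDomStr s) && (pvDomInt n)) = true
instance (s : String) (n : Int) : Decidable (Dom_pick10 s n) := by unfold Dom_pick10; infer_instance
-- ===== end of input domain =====

-- B replaces A's out/count accumulator loop by a loop-free read: one modulo for the start, the string replicated into a flat buffer, ten fixed-position reads (alternative decomposition).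


-- ===== PORT A =====
-- literal port of A: out/count accumulator over range(10); s[(n+count)%l] is pyGet?.
-- pyGet?'s none (IndexError) is unreachable for l > 0, and s = "" (ZeroDivisionError of %) is
-- excluded by Pre_, so the getD default is never used inside Pre_.
def pick10 (s : String) (n : Int) : String :=
  let l : Int := PySem.Str.len s
  let r := (PySem.List.pyRange 0 10 1).foldl
    (fun (st : List Char × Int) i =>
      (st.1 ++ [(PySem.Str.pyGet? s (PySem.Int.mod (n + st.2) l)).getD ' '], st.2 + (i + 1)))
    ([], 0)
  String.ofList r.1

-- ===== PORT B =====
-- port of B: start = n % l; ext = s * ((start+45)//l + 1) is the replicated flat buffer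
-- (Python's s * m, ported as m copies of s's characters flattened); then ten direct reads
-- ext[start + t] at the fixed offsets, concatenated. Each read is pyGet? with getD (in-range
-- under Pre_, as in A's port).
def pick10_alt (s : String) (n : Int) : String :=
  let l : Int := PySem.Str.len s
  let start : Int := PySem.Int.mod n l
  let ext : String :=
    String.ofList (List.flatten (List.replicate (PySem.Int.floordiv (start + 45) l + 1).toNat s.toList))
  let g : Int → Char := fun i => (PySem.Str.pyGet? ext i).getD ' '
  String.ofList [g start, g (start + 1), g (start + 3), g (start + 6), g (start + 10),
                 g (start + 15), g (start + 21), g (start + 28), g (start + 36), g (start + 45)]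

-- ===== PRECONDITION & SPEC =====
-- s = "" is excluded: there Python's '% len(s)' raises ZeroDivisionError (in A and in B alike).
def Pre_pick10 (s : String) (n : Int) : Prop := s ≠ ""
instance (s : String) (n : Int) : Decidable (Pre_pick10 s n) := by unfold Pre_pick10; infer_instance
def pvWitness_pick10 : String × Int := ("abc", 0)
def Spec_pick10 (s : String) (n : Int) (out : String) : Prop := out = pick10_alt s n
instance (s : String) (n : Int) (out : String) : Decidable (Spec_pick10 s n out) := by unfold Spec_pick10; infer_instance

-- ===== CLAIM (what is proved, stated in full; the proofs are below) =====
def Claim_equal_pick10 : Prop := ∀ (s : String) (n : Int), Dom_pick10 s n → Pre_pick10 s n → Spec_pick10 s n (pick10 s n)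

-- ===== LEMMAS AND PROOFS =====

-- the triangular-number recurrence, in Nat
lemma tri_succ (k : Nat) : k * (k + 1) / 2 + (k + 1) = (k + 1) * (k + 2) / 2 := by
  have h : (k + 1) * (k + 2) = k * (k + 1) + 2 * (k + 1) := by ring
  rw [h]
  generalize k * (k + 1) = m
  omega

-- invariant of A's fold: after k iterations, out holds the characters at offsets T_j (j < k)
-- and count is the triangular number k*(k+1)/2
lemma pick10_fold_inv (s : String) (n : Int) (k : Nat) :
    (PySem.List.pyRange 0 (k : Int) 1).foldl
      (fun (st : List Char × Int) i =>
        (st.1 ++ [(PySem.Str.pyGet? s (PySem.Int.mod (n + st.2) (PySem.Str.len s))).getD ' '], st.2 + (i + 1)))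
      ([], 0)
    = ((List.range k).map (fun j =>
        (PySem.Str.pyGet? s (PySem.Int.mod (n + ((j * (j + 1) / 2 : Nat) : Int)) (PySem.Str.len s))).getD ' '),
       ((k * (k + 1) / 2 : Nat) : Int)) := by
  induction k with
  | zero =>
      rw [show ((0 : Nat) : Int) = 0 from rfl, PySem.List.pyRange_one_eq_nil (le_refl 0)]
      simp
  | succ k ih =>
      rw [show ((k + 1 : Nat) : Int) = (k : Int) + 1 from by push_cast; ring,
          PySem.List.pyRange_one_succ_right (Int.natCast_nonneg k), List.foldl_append, ih]
      simp only [List.foldl]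
      rw [Prod.mk.injEq]
      refine ⟨?_, ?_⟩
      · rw [List.range_succ, List.map_append]
        simp
      · rw [show ((k : Int) + 1) = ((k + 1 : Nat) : Int) from by push_cast; ring,
            ← Nat.cast_add, tri_succ k]

-- reading the replicated buffer: position k of m flattened copies of xs is xs[k % |xs|]
lemma flatten_replicate_getElem? {α : Type} (xs : List α) (m k : Nat)
    (h : k < m * xs.length) :
    (List.flatten (List.replicate m xs))[k]? = xs[k % xs.length]? := by
  induction m generalizing k with
  | zero => omega
  | succ m ih =>
      rw [List.replicate_succ, List.flatten_cons]
      have hmul : (m + 1) * xs.length = m * xs.length + xs.length := by ring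
      by_cases hk : k < xs.length
      · rw [List.getElem?_append_left hk, Nat.mod_eq_of_lt hk]
      · have hlen : xs.length ≤ k := by omega
        rw [List.getElem?_append_right hlen, ih (k - xs.length) (by omega),
          Nat.mod_eq_sub_mod hlen]

-- the key per-character fact: reading B's flat buffer at start + t equals A's modular read at
-- (n + t) % l, for any offset 0 ≤ t ≤ 45 and nonempty s
lemma ext_char (s : String) (n t : Int) (hs : s.toList ≠ []) (ht0 : 0 ≤ t) (ht45 : t ≤ 45) :
    (PySem.Str.pyGet?
        (String.ofList (List.flatten (List.replicate
          (PySem.Int.floordiv (PySem.Int.mod n (PySem.Str.len s) + 45) (PySem.Str.len s) + 1).toNat s.toList)))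
        (PySem.Int.mod n (PySem.Str.len s) + t)).getD ' '
    = (PySem.Str.pyGet? s (PySem.Int.mod (n + t) (PySem.Str.len s))).getD ' ' := by
  have hlen : 0 < s.toList.length := List.length_pos_iff.mpr hs
  have hl : (0 : Int) < PySem.Str.len s := by
    rw [PySem.Str.len_eq]; exact_mod_cast hlen
  set l : Int := PySem.Str.len s with hldef
  have hlen' : (s.toList.length : Int) = l := by rw [hldef, PySem.Str.len_eq]
  have hstart0 : 0 ≤ PySem.Int.mod n l := PySem.Int.mod_nonneg n hl
  have hstartl : PySem.Int.mod n l < l := PySem.Int.mod_lt n hl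
  set start : Int := PySem.Int.mod n l with hstartdef
  -- number of copies m: m * l > start + 45
  set m : Int := PySem.Int.floordiv (start + 45) l + 1 with hmdef
  have hfd : PySem.Int.floordiv (start + 45) l = (start + 45) / l :=
    PySem.Int.floordiv_eq_ediv_of_pos hl
  have hediv : l * ((start + 45) / l) + (start + 45) % l = start + 45 := Int.ediv_add_emod _ _
  have hemod0 : 0 ≤ (start + 45) % l := Int.emod_nonneg _ (by omega)
  have hemodl : (start + 45) % l < l := Int.emod_lt_of_pos _ hl
  have hml : m * l = l * ((start + 45) / l) + l := by rw [hmdef, hfd]; ring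
  have hm : start + t < m * l := by omega
  have hm0 : 0 ≤ m := by
    have : 0 ≤ (start + 45) / l := Int.ediv_nonneg (by omega) (by omega)
    rw [hmdef, hfd]; omega
  -- LHS: in-range direct read of the flat buffer
  have hk : (start + t).toNat < m.toNat * s.toList.length := by
    have h1 : ((m.toNat * s.toList.length : Nat) : Int) = m * l := by
      push_cast
      rw [Int.toNat_of_nonneg hm0, hlen']
    omega
  have hlhs : PySem.Str.pyGet?
      (String.ofList (List.flatten (List.replicate m.toNat s.toList))) (start + t)
      = s.toList[(start + t).toNat % s.toList.length]? := by
    rw [show start + t = (((start + t).toNat : Nat) : Int) from by omega, PySem.Str.pyGet?_natCast]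
    refine Eq.trans ?_ (flatten_replicate_getElem? s.toList m.toNat (start + t).toNat hk)
    simp
  -- RHS: in-range modular read of s, same index
  have hmodeq : PySem.Int.mod (n + t) l = Int.emod (start + t) l := by
    have hn : l * (n / l) + n % l = n := Int.ediv_add_emod n l
    rw [PySem.Int.mod_eq_emod_of_pos hl, hstartdef, PySem.Int.mod_eq_emod_of_pos hl,
        show n + t = (n % l + t) + l * (n / l) from by omega, Int.add_mul_emod_self_left]
    rfl
  have hcast : Int.emod (start + t) l = (((start + t).toNat % s.toList.length : Nat) : Int) := by
    rw [Int.natCast_mod, Int.toNat_of_nonneg (by omega), hlen']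
    rfl
  have hrhs : PySem.Str.pyGet? s (PySem.Int.mod (n + t) l)
      = s.toList[(start + t).toNat % s.toList.length]? := by
    rw [hmodeq, hcast, PySem.Str.pyGet?_natCast]
  rw [hlhs, hrhs]

-- B's fixed offsets are the ten triangular numbers
lemma tri_vals : (List.range 10).map (fun j => ((j * (j + 1) / 2 : Nat) : Int))
    = [0, 1, 3, 6, 10, 15, 21, 28, 36, 45] := by decide

-- ===== VERDICT (by name: the statement is the Claim_ definition above) =====
theorem pick10_spec : Claim_equal_pick10 := by
  intro s n _ hpre
  have hs : s.toList ≠ [] := fun hh => hpre (String.toList_eq_nil_iff.mp hh)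
  unfold Spec_pick10 pick10 pick10_alt
  show String.ofList
      ((PySem.List.pyRange 0 10 1).foldl
        (fun (st : List Char × Int) i =>
          (st.1 ++ [(PySem.Str.pyGet? s (PySem.Int.mod (n + st.2) (PySem.Str.len s))).getD ' '],
           st.2 + (i + 1)))
        ([], 0)).1 = _
  rw [show (10 : Int) = ((10 : Nat) : Int) from by norm_num, pick10_fold_inv s n 10]
  simp only []
  refine congrArg String.ofList ?_
  have hmap : (List.range 10).map (fun j =>
      (PySem.Str.pyGet? s (PySem.Int.mod (n + ((j * (j + 1) / 2 : Nat) : Int)) (PySem.Str.len s))).getD ' ')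
      = [(0:Int), 1, 3, 6, 10, 15, 21, 28, 36, 45].map (fun t =>
      (PySem.Str.pyGet? s (PySem.Int.mod (n + t) (PySem.Str.len s))).getD ' ') := by
    rw [← tri_vals, List.map_map]
    rfl
  rw [hmap]
  have h0 := ext_char s n 0 hs (le_refl 0) (by norm_num)
  rw [add_zero, add_zero] at h0
  simp only [List.map, add_zero]
  rw [← h0,
      ← ext_char s n 1 hs (by norm_num) (by norm_num),
      ← ext_char s n 3 hs (by norm_num) (by norm_num),
      ← ext_char s n 6 hs (by norm_num) (by norm_num),
      ← ext_char s n 10 hs (by norm_num) (by norm_num),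
      ← ext_char s n 15 hs (by norm_num) (by norm_num),
      ← ext_char s n 21 hs (by norm_num) (by norm_num),
      ← ext_char s n 28 hs (by norm_num) (by norm_num),
      ← ext_char s n 36 hs (by norm_num) (by norm_num),
      ← ext_char s n 45 hs (by norm_num) (by norm_num)]
  norm_num
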